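-- pv_equiv track=rewrite | github.com/Franco-Sendros/Ejercicio-3 | ejercicio3.py | obtenerModulo
-- ===== SOURCE A (Python) =====
-- def obtenerModulo(k):
--     divisor = 2701
--     array = [1920,1032,1365,2253]
--     if k == 1:
--         return array[0]
--     if k <= 0:
--         return 0
--
--     resto = array[0]
--     indice = 1
--     for i in range(1 , k):
--         resto = (resto + array [indice]) % divisor
--         indice += 1
--         if indice == 4:
--             indice = 0
--
--     return resto
-- ===== SOURCE B (Python) =====
-- def obtenerModulo(k):
--     # Closed form: k//4 full cycles of sum 6570 plus a prefix of the 4-cycle, one mod at the end.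
--     if k <= 0:
--         return 0
--     return (k // 4 * 6570 + (0, 1920, 2952, 4317)[k % 4]) % 2701
-- ===== Notes on version B (the rewrite author's own statement) =====
-- stated objective: faster
-- what changed: Replaced the O(k) accumulation loop with a closed form: full-cycle count times the constant cycle sum plus a prefix-table lookup, one final mod.
import Mathlib
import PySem

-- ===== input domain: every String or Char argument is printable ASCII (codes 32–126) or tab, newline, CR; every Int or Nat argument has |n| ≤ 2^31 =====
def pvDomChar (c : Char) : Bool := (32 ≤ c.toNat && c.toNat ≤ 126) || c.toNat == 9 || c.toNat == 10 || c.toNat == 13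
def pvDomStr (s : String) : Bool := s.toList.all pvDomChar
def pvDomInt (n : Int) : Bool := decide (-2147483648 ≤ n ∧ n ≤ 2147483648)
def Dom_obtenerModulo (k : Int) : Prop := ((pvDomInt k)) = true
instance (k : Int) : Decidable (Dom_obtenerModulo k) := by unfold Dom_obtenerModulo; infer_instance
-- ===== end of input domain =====

-- B replaces A's O(k) accumulation loop by a closed form (full-cycle count × cycle sum + prefix table, one final mod): asymptotically faster.


-- ===== PORT A =====
-- the loop body of A: resto = (resto + array[indice]) % divisor; indice += 1; wrap at 4
def stepA (st : Int × Int) : Int × Int :=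
  let resto := PySem.Int.mod (st.1 + PySem.List.pyGetD [1920, 1032, 1365, 2253] st.2 0) 2701
  let indice := st.2 + 1
  (resto, if indice = 4 then 0 else indice)

def obtenerModulo (k : Int) : Int :=
  let array : List Int := [1920, 1032, 1365, 2253]
  if k = 1 then PySem.List.pyGetD array 0 0
  else if k ≤ 0 then 0
  else
    ((PySem.List.pyRange 1 k).foldl (fun st _ => stepA st)
      (PySem.List.pyGetD array 0 0, 1)).1

-- ===== PORT B =====
def obtenerModulo_alt (k : Int) : Int :=
  if k ≤ 0 then 0
  else
    PySem.Int.mod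
      (PySem.Int.floordiv k 4 * 6570 +
        PySem.List.pyGetD [0, 1920, 2952, 4317] (PySem.Int.mod k 4) 0)
      2701

-- ===== PRECONDITION & SPEC =====
def Spec_obtenerModulo (k : Int) (out : Int) : Prop := out = obtenerModulo_alt k
instance (k : Int) (out : Int) : Decidable (Spec_obtenerModulo k out) := by unfold Spec_obtenerModulo; infer_instance

-- ===== CLAIM (what is proved, stated in full; the proofs are below) =====
def Claim_equal_obtenerModulo : Prop := ∀ (k : Int), Dom_obtenerModulo k → Spec_obtenerModulo k (obtenerModulo k)

-- ===== LEMMAS AND PROOFS =====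

-- the value B computes for m ≥ 1, written with Lean's ediv/emod (equal to floor div/mod for positive divisor)
def closedVal (m : Int) : Int :=
  (m / 4 * 6570 + PySem.List.pyGetD [0, 1920, 2952, 4317] (m % 4) 0) % 2701

lemma stepA_closed (m : Int) :
    stepA (closedVal m, m % 4) = (closedVal (m + 1), (m + 1) % 4) := by
  have hmod := PySem.Int.mod_eq_emod_of_pos (a := 0) (b := 2701) (by norm_num)
  have h4 : m % 4 = 0 ∨ m % 4 = 1 ∨ m % 4 = 2 ∨ m % 4 = 3 := by omega
  rcases h4 with h | h | h | h
  · have h' : (m + 1) % 4 = 1 := by omega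
    simp only [stepA, closedVal, h, h', PySem.List.pyGetD, PySem.List.pyGet?, PySem.List.pyIdx?,
      PySem.Int.mod_eq_emod_of_pos (by norm_num : (0:Int) < 2701)]
    norm_num [Prod.ext_iff, show Int.toNat 2 = 2 from rfl, show Int.toNat 3 = 3 from rfl, List.getElem_cons_succ, List.getElem_cons_zero]
    omega
  · have h' : (m + 1) % 4 = 2 := by omega
    simp only [stepA, closedVal, h, h', PySem.List.pyGetD, PySem.List.pyGet?, PySem.List.pyIdx?,
      PySem.Int.mod_eq_emod_of_pos (by norm_num : (0:Int) < 2701)]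
    norm_num [Prod.ext_iff, show Int.toNat 2 = 2 from rfl, show Int.toNat 3 = 3 from rfl, List.getElem_cons_succ, List.getElem_cons_zero]
    omega
  · have h' : (m + 1) % 4 = 3 := by omega
    simp only [stepA, closedVal, h, h', PySem.List.pyGetD, PySem.List.pyGet?, PySem.List.pyIdx?,
      PySem.Int.mod_eq_emod_of_pos (by norm_num : (0:Int) < 2701)]
    norm_num [Prod.ext_iff, show Int.toNat 2 = 2 from rfl, show Int.toNat 3 = 3 from rfl, List.getElem_cons_succ, List.getElem_cons_zero]
    omega
  · have h' : (m + 1) % 4 = 0 := by omega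
    simp only [stepA, closedVal, h, h', PySem.List.pyGetD, PySem.List.pyGet?, PySem.List.pyIdx?,
      PySem.Int.mod_eq_emod_of_pos (by norm_num : (0:Int) < 2701)]
    norm_num [Prod.ext_iff, show Int.toNat 2 = 2 from rfl, show Int.toNat 3 = 3 from rfl, List.getElem_cons_succ, List.getElem_cons_zero]
    omega

lemma loop_closed (n : Nat) :
    ((PySem.List.pyRange 1 ((n : Int) + 2)).foldl (fun st _ => stepA st) (1920, 1))
      = (closedVal ((n : Int) + 2), ((n : Int) + 2) % 4) := by
  induction n with
  | zero =>
      decide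
  | succ n ih =>
      rw [show ((n + 1 : Nat) : Int) + 2 = ((n : Int) + 2) + 1 by push_cast; ring,
        PySem.List.pyRange_one_succ_right (by omega), List.foldl_append]
      simp only [List.foldl, ih]
      exact stepA_closed _

theorem equal_aux (k : Int) : obtenerModulo k = obtenerModulo_alt k := by
  by_cases h1 : k = 1
  · subst h1; decide
  · by_cases h0 : k ≤ 0
    · simp [obtenerModulo, obtenerModulo_alt, h0, h1]
    · -- k ≥ 2
      have hk2 : 2 ≤ k := by omega
      obtain ⟨n, hn⟩ : ∃ n : Nat, k = (n : Int) + 2 := ⟨(k - 2).toNat, by omega⟩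
      have hfd := PySem.Int.floordiv_eq_ediv_of_pos (a := k) (b := 4) (by norm_num)
      have hmd := PySem.Int.mod_eq_emod_of_pos (a := k) (b := 4) (by norm_num)
      simp only [obtenerModulo, obtenerModulo_alt, if_neg (by omega : ¬ ((n:Int)+2 = 1)), if_neg (by omega : ¬ ((n:Int)+2 ≤ 0)), hn]
      have hinit : (PySem.List.pyGetD [(1920:Int), 1032, 1365, 2253] 0 0, (1:Int)) = ((1920:Int), (1:Int)) := by decide
      rw [hinit, loop_closed n]
      rw [PySem.Int.mod_eq_emod_of_pos (by norm_num : (0:Int) < 2701),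
        PySem.Int.floordiv_eq_ediv_of_pos (by norm_num : (0:Int) < 4),
        PySem.Int.mod_eq_emod_of_pos (by norm_num : (0:Int) < 4)]
      rfl

-- ===== VERDICT (by name: the statement is the Claim_ definition above) =====
theorem obtenerModulo_spec : Claim_equal_obtenerModulo := by
  intro k _
  exact equal_aux k
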